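-- pv_equiv track=rewrite | github.com/kundajelab/tfmodisco | modisco/seqlet_embedding/advanced_gapped_kmer.py | get_template_to_startidx_and_embedding_size
-- ===== SOURCE A (Python) =====
-- import itertools
--
-- def get_template_to_startidx_and_embedding_size(
--         max_len, min_k, max_k, alphabet_size):
--     template_to_startidx = {}
--     start_idx = 0
--     for a_len in range(min_k, max_len+1):
--         for num_nongap in range(min_k-2, min(a_len-2, max_k)+1):
--             nongap_pos_combos = itertools.combinations(range(a_len-2), num_nongap)
--             for nongap_pos_combo in nongap_pos_combos:
--                 template = [False]*(a_len-2)
--                 for nongap_pos in nongap_pos_combo: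
--                     template[nongap_pos] = True
--                 template = tuple([True]+template+[True])
--                 template_to_startidx[template] = start_idx
--                 start_idx += alphabet_size**(num_nongap+2)
--     return template_to_startidx, start_idx
-- ===== SOURCE B (Python) =====
-- def _masks(L, r):
--     # all length-L boolean lists with exactly r Trues, in the order
--     # itertools.combinations enumerates the True-position sets
--     if r < 0 or r > L:
--         return []
--     if r == 0:
--         return [[False] * L]
--     return ([[True] + t for t in _masks(L - 1, r - 1)]
--             + [[False] + t for t in _masks(L - 1, r)])
--
--
-- def get_template_to_startidx_and_embedding_size(
--         max_len, min_k, max_k, alphabet_size):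
--     # pass 1: build the (template, size) table
--     entries = []
--     for a_len in range(min_k, max_len + 1):
--         for num_nongap in range(min_k - 2, min(a_len - 2, max_k) + 1):
--             entries.extend(
--                 (tuple([True] + m + [True]),
--                  alphabet_size ** (num_nongap + 2))
--                 for m in _masks(a_len - 2, num_nongap))
--     # pass 2: prefix-sum the sizes into start indices
--     template_to_startidx = {}
--     total = 0
--     for template, size in entries:
--         template_to_startidx[template] = total
--         total += size
--     return template_to_startidx, total
-- ===== Notes on version B (the rewrite author's own statement) =====
-- stated objective: alternative
-- what changed: Single accumulator-threaded pass over itertools.combinations is replaced by a recursive choose-first/skip-first mask generator (same enumeration order) building a (template,size) table, followed by a separate prefix-sum pass assigning start indices.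
import Mathlib
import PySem

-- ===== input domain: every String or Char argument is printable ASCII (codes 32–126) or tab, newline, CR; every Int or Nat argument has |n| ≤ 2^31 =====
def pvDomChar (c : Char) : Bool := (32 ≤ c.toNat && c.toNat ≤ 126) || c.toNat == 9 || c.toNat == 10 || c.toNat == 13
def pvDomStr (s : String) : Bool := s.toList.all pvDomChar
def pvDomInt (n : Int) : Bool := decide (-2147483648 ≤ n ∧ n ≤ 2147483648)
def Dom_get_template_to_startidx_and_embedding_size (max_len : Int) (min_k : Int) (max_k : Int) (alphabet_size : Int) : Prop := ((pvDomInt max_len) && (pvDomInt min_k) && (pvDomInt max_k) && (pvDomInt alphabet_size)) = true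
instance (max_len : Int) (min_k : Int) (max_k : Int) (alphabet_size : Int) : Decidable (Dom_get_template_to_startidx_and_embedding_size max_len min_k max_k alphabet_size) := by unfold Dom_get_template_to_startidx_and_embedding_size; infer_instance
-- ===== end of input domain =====

-- B replaces A's single accumulator-threaded pass over itertools.combinations by a recursive
-- choose-first/skip-first mask generator plus a separate prefix-sum pass (alternative decomposition).

-- ===== PORT A =====
-- itertools.combinations(xs, r), lexicographic order of position tuples
def pvCombos {α : Type} : List α → Nat → List (List α)
  | _, 0 => [[]]
  | [], _+1 => []
  | x :: xs, r+1 => (pvCombos xs r).map (x :: ·) ++ pvCombos xs (r+1)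

def get_template_to_startidx_and_embedding_size (max_len : Int) (min_k : Int) (max_k : Int) (alphabet_size : Int) : (List (List Bool × Int)) × Int :=
  let res := (PySem.List.pyRange min_k (max_len+1) 1).foldl (fun st a_len =>
    (PySem.List.pyRange (min_k-2) (min (a_len-2) max_k + 1) 1).foldl (fun st num_nongap =>
      (pvCombos (PySem.List.pyRange 0 (a_len-2) 1) num_nongap.toNat).foldl (fun st nongap_pos_combo =>
        let template0 := nongap_pos_combo.foldl (fun t p => t.set p.toNat true) (List.replicate (a_len-2).toNat false)
        let template := [true] ++ template0 ++ [true]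
        (st.1.insert template st.2, st.2 + alphabet_size ^ (num_nongap + 2).toNat)) st) st)
    ((PySem.Dict.empty : PySem.Dict (List Bool) Int), (0:Int))
  (res.1.items, res.2)

-- ===== PORT B =====
-- _masks from Source B: all length-L boolean lists with exactly r Trues, combinations order
def pvMasks (L : Int) (r : Int) : List (List Bool) :=
  if h1 : r < 0 ∨ r > L then []
  else if h2 : r = 0 then [List.replicate L.toNat false]
  else (pvMasks (L-1) (r-1)).map (true :: ·) ++ (pvMasks (L-1) r).map (false :: ·)
termination_by L.toNat
decreasing_by
  · omega
  · omega

def get_template_to_startidx_and_embedding_size_alt (max_len : Int) (min_k : Int) (max_k : Int) (alphabet_size : Int) : (List (List Bool × Int)) × Int :=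
  let entries := (PySem.List.pyRange min_k (max_len+1) 1).foldl (fun es a_len =>
    (PySem.List.pyRange (min_k-2) (min (a_len-2) max_k + 1) 1).foldl (fun es num_nongap =>
      es ++ (pvMasks (a_len-2) num_nongap).map (fun m =>
        ([true] ++ m ++ [true], alphabet_size ^ (num_nongap + 2).toNat))) es)
    ([] : List (List Bool × Int))
  let res := entries.foldl (fun st e => (st.1.insert e.1 st.2, st.2 + e.2))
    ((PySem.Dict.empty : PySem.Dict (List Bool) Int), (0:Int))
  (res.1.items, res.2)

-- ===== PRECONDITION & SPEC =====
-- Pre_ excludes exactly the inputs where A raises ValueError: min_k ≤ 1 with a non-empty loop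
-- body makes itertools.combinations receive a negative r.
def Pre_get_template_to_startidx_and_embedding_size (max_len : Int) (min_k : Int) (max_k : Int) (alphabet_size : Int) : Prop :=
  2 ≤ min_k ∨ max_len < min_k ∨ max_k < min_k - 2
instance (max_len : Int) (min_k : Int) (max_k : Int) (alphabet_size : Int) : Decidable (Pre_get_template_to_startidx_and_embedding_size max_len min_k max_k alphabet_size) := by unfold Pre_get_template_to_startidx_and_embedding_size; infer_instance

def pvWitness_get_template_to_startidx_and_embedding_size : Int × Int × Int × Int := (5, 2, 3, 4)

def Spec_get_template_to_startidx_and_embedding_size (max_len : Int) (min_k : Int) (max_k : Int) (alphabet_size : Int) (out : (List (List Bool × Int)) × Int) : Prop := out = get_template_to_startidx_and_embedding_size_alt max_len min_k max_k alphabet_size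
instance (max_len : Int) (min_k : Int) (max_k : Int) (alphabet_size : Int) (out : (List (List Bool × Int)) × Int) : Decidable (Spec_get_template_to_startidx_and_embedding_size max_len min_k max_k alphabet_size out) := by unfold Spec_get_template_to_startidx_and_embedding_size; infer_instance

-- ===== CLAIM (what is proved, stated in full; the proofs are below) =====
def Claim_equal_get_template_to_startidx_and_embedding_size : Prop := ∀ (max_len : Int) (min_k : Int) (max_k : Int) (alphabet_size : Int), Dom_get_template_to_startidx_and_embedding_size max_len min_k max_k alphabet_size → Pre_get_template_to_startidx_and_embedding_size max_len min_k max_k alphabet_size → Spec_get_template_to_startidx_and_embedding_size max_len min_k max_k alphabet_size (get_template_to_startidx_and_embedding_size max_len min_k max_k alphabet_size)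

-- ===== LEMMAS AND PROOFS =====

-- the common per-entry step: insert the template at the running start index, add its size
def pvStep (st : PySem.Dict (List Bool) Int × Int) (e : List Bool × Int) : PySem.Dict (List Bool) Int × Int :=
  (st.1.insert e.1 st.2, st.2 + e.2)

theorem pv_nest1 {α E S : Type} (step : S → E → S) (g : α → List E) :
    ∀ (l : List α) (init : S),
      l.foldl (fun st x => (g x).foldl step st) init = (l.flatMap g).foldl step init := by
  intro l
  induction l with
  | nil => intro init; rfl
  | cons h t ih => intro init; simp [List.foldl_append, ih]

theorem pv_flatMap_congr {α E : Type} (f g : α → List E) :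
    ∀ (l : List α), (∀ x ∈ l, f x = g x) → l.flatMap f = l.flatMap g := by
  intro l
  induction l with
  | nil => intro _; rfl
  | cons h t ih =>
    intro hp
    simp only [List.flatMap_cons]
    rw [hp h (by simp), ih (fun x hx => hp x (by simp [hx]))]

theorem pvMasks_of_gt (L r : Int) (h : r > L) : pvMasks L r = [] := by
  rw [pvMasks]; simp [h]

theorem pvMasks_zero (L : Int) (h : 0 ≤ L) : pvMasks L 0 = [List.replicate L.toNat false] := by
  rw [pvMasks]; simp; omega

theorem pvMasks_succ (n r : Nat) :
    pvMasks ((n : Int) + 1) ((r : Int) + 1)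
      = (pvMasks n r).map (true :: ·) ++ (pvMasks ((n : Int)) ((r : Int) + 1)).map (false :: ·) := by
  rw [pvMasks]
  by_cases h : (r : Int) + 1 > (n : Int) + 1
  · rw [dif_pos (by omega)]
    rw [pvMasks_of_gt _ _ (show (r:Int) > n by omega), pvMasks_of_gt _ _ (show (r:Int)+1 > n by omega)]
    simp
  · rw [dif_neg (by omega), dif_neg (by omega)]
    norm_num

theorem pvCombos_map {α β : Type} (f : α → β) :
    ∀ (xs : List α) (r : Nat), pvCombos (xs.map f) r = (pvCombos xs r).map (List.map f) := by
  intro xs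
  induction xs with
  | nil => intro r; cases r <;> simp [pvCombos]
  | cons x t ih =>
    intro r
    cases r with
    | zero => simp [pvCombos]
    | succ r => simp [pvCombos, ih, List.map_map, Function.comp]

theorem pv_shift_fold (c : List Nat) :
    ∀ (b : Bool) (t : List Bool),
      (c.map (· + 1)).foldl (fun t p => t.set p true) (b :: t)
        = b :: c.foldl (fun t p => t.set p true) t := by
  induction c with
  | nil => intro b t; rfl
  | cons p c ih =>
    intro b t
    simp only [List.map_cons, List.foldl_cons, List.set]
    exact ih b _

theorem pv_core :
    ∀ (n : Nat) (r : Nat),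
      (pvCombos (List.range n) r).map
          (fun c => c.foldl (fun t p => t.set p true) (List.replicate n false))
        = pvMasks (n : Int) (r : Int) := by
  intro n
  induction n with
  | zero =>
    intro r
    cases r with
    | zero =>
      push_cast
      rw [pvMasks_zero _ le_rfl]
      simp [pvCombos]
    | succ r =>
      push_cast
      rw [pvMasks_of_gt _ _ (by omega)]
      simp [pvCombos]
  | succ n ih =>
    intro r
    cases r with
    | zero =>
      push_cast
      rw [pvMasks_zero _ (by positivity)]
      simp [pvCombos]
    | succ r =>
      have hrange : List.range (n+1) = 0 :: (List.range n).map (· + 1) := by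
        rw [List.range_succ_eq_map]
      rw [hrange]
      show ((pvCombos ((List.range n).map (· + 1)) r).map (0 :: ·)
              ++ pvCombos ((List.range n).map (· + 1)) (r+1)).map _ = _
      rw [pvCombos_map, pvCombos_map]
      have ih1 := ih r
      have ih2 := ih (r+1)
      push_cast at ih2 ⊢
      rw [pvMasks_succ, ← ih1, ← ih2]
      simp only [List.map_append, List.map_map]
      congr 1
      · apply List.map_congr_left
        intro c _
        simp only [Function.comp_apply, List.foldl_cons, List.replicate_succ, List.set]
        exact pv_shift_fold c true _
      · apply List.map_congr_left
        intro c _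
        simp only [Function.comp_apply, List.replicate_succ]
        exact pv_shift_fold c false _

-- Int-cast version of the core lemma, in the exact shape of the ports' inner group
theorem pv_group_eq (a nn alphabet_size : Int) (h0 : 0 ≤ nn) (h2 : nn ≤ a - 2) :
    (pvCombos (PySem.List.pyRange 0 (a-2) 1) nn.toNat).map
        (fun c => ([true] ++ c.foldl (fun t p => t.set p.toNat true)
                      (List.replicate (a-2).toNat false) ++ [true],
                   alphabet_size ^ (nn + 2).toNat))
      = (pvMasks (a-2) nn).map (fun m => ([true] ++ m ++ [true], alphabet_size ^ (nn + 2).toNat)) := by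
  have hL : (((a-2).toNat : Int)) = a - 2 := Int.toNat_of_nonneg (by omega)
  have hr : ((nn.toNat : Int)) = nn := Int.toNat_of_nonneg h0
  set n := (a-2).toNat with hn
  set r := nn.toNat with hrdef
  have hrange : PySem.List.pyRange 0 (a-2) 1 = List.map (fun (k : Nat) => (k : Int)) (List.range n) := by
    rw [PySem.List.pyRange_zero, ← hn]
  rw [hrange, pvCombos_map]
  have hfold : ∀ c : List Nat,
      (List.map (fun (k : Nat) => (k : Int)) c).foldl (fun t p => t.set p.toNat true)
          (List.replicate n false)
        = c.foldl (fun t p => t.set p true) (List.replicate n false) := by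
    intro c
    rw [List.foldl_map]
    simp
  have := pv_core n r
  rw [hL, hr] at this
  rw [← this]
  simp only [List.map_map]
  apply List.map_congr_left
  intro c _
  simp only [Function.comp_apply]
  rw [hfold c]

theorem pv_side_A (max_len min_k max_k alphabet_size : Int) :
    get_template_to_startidx_and_embedding_size max_len min_k max_k alphabet_size
      = (let flat := (PySem.List.pyRange min_k (max_len+1) 1).flatMap (fun a_len =>
           (PySem.List.pyRange (min_k-2) (min (a_len-2) max_k + 1) 1).flatMap (fun num_nongap =>
             (pvCombos (PySem.List.pyRange 0 (a_len-2) 1) num_nongap.toNat).map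
               (fun c => ([true] ++ c.foldl (fun t p => t.set p.toNat true)
                             (List.replicate (a_len-2).toNat false) ++ [true],
                          alphabet_size ^ (num_nongap + 2).toNat))))
         let res := flat.foldl pvStep ((PySem.Dict.empty : PySem.Dict (List Bool) Int), (0:Int))
         (res.1.items, res.2)) := by
  unfold get_template_to_startidx_and_embedding_size
  simp only
  refine congrArg (fun res : PySem.Dict (List Bool) Int × Int => (res.1.items, res.2)) ?_
  rw [← pv_nest1]
  apply PySem.List.foldl_congr_mem
  intro st a_len _
  rw [← pv_nest1]
  apply PySem.List.foldl_congr_mem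
  intro st num_nongap _
  rw [List.foldl_map]
  rfl

theorem pv_entries_B (max_len min_k max_k alphabet_size : Int) :
    ((PySem.List.pyRange min_k (max_len+1) 1).foldl (fun es a_len =>
        (PySem.List.pyRange (min_k-2) (min (a_len-2) max_k + 1) 1).foldl (fun es num_nongap =>
          es ++ (pvMasks (a_len-2) num_nongap).map (fun m =>
            ([true] ++ m ++ [true], alphabet_size ^ (num_nongap + 2).toNat))) es)
      ([] : List (List Bool × Int)))
    = (PySem.List.pyRange min_k (max_len+1) 1).flatMap (fun a_len =>
        (PySem.List.pyRange (min_k-2) (min (a_len-2) max_k + 1) 1).flatMap (fun num_nongap =>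
          (pvMasks (a_len-2) num_nongap).map (fun m =>
            ([true] ++ m ++ [true], alphabet_size ^ (num_nongap + 2).toNat)))) := by
  calc ((PySem.List.pyRange min_k (max_len+1) 1).foldl (fun es a_len =>
        (PySem.List.pyRange (min_k-2) (min (a_len-2) max_k + 1) 1).foldl (fun es num_nongap =>
          es ++ (pvMasks (a_len-2) num_nongap).map (fun m =>
            ([true] ++ m ++ [true], alphabet_size ^ (num_nongap + 2).toNat))) es)
      ([] : List (List Bool × Int)))
      = (PySem.List.pyRange min_k (max_len+1) 1).foldl (fun es a_len =>
          es ++ (PySem.List.pyRange (min_k-2) (min (a_len-2) max_k + 1) 1).flatMap (fun num_nongap =>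
            (pvMasks (a_len-2) num_nongap).map (fun m =>
              ([true] ++ m ++ [true], alphabet_size ^ (num_nongap + 2).toNat)))) [] := by
        apply PySem.List.foldl_congr_mem
        intro es a_len _
        rw [PySem.List.foldl_append_eq_flatMap]
    _ = _ := by rw [PySem.List.foldl_append_eq_flatMap]; rfl

-- ===== VERDICT (by name: the statement is the Claim_ definition above) =====
theorem get_template_to_startidx_and_embedding_size_spec : Claim_equal_get_template_to_startidx_and_embedding_size := by
  intro max_len min_k max_k alphabet_size _ hpre
  unfold Spec_get_template_to_startidx_and_embedding_size
  rw [pv_side_A]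
  unfold get_template_to_startidx_and_embedding_size_alt
  simp only
  rw [pv_entries_B]
  show _ = (let res := List.foldl pvStep ((PySem.Dict.empty : PySem.Dict (List Bool) Int), (0:Int)) _
            (res.1.items, res.2))
  simp only
  refine congrArg (fun l : List (List Bool × Int) =>
    ((List.foldl pvStep ((PySem.Dict.empty : PySem.Dict (List Bool) Int), (0:Int)) l).1.items,
     (List.foldl pvStep ((PySem.Dict.empty : PySem.Dict (List Bool) Int), (0:Int)) l).2)) ?_
  apply pv_flatMap_congr
  intro a_len ha
  apply pv_flatMap_congr
  intro nn hnn
  rw [PySem.List.mem_pyRange_one] at ha hnn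
  have h0 : 0 ≤ nn := by
    rcases hpre with h | h | h <;> omega
  exact pv_group_eq a_len nn alphabet_size h0 (by omega)

-- ===== VERDICT (by name: the statement is the Claim_ definition above) =====
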